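-- pv_equiv track=rewrite | github.com/RonyThatsWho/kg_ronythatswho_2016 | main.py | mapDFS
-- ===== SOURCE A (Python) =====
-- def mapDFS(paths, current, nextGoal, goals):
--     """Recursive function that explorers mapping possibilities and returns True if path that crosses ALL goals is possible.
--
--     Arguments:
--          paths (list of ints): currently available paths to choose from
--          current (int): Current subtotal before selecting next potential path
--          nextGoal (int): current target goal index from goals array
--          goals (list of ints) list of all goals that NEED to be visited
--
--
--     Returns:
--         Boolean: Returns True if Target has been found
--                  Returns False once search path has been exhausted
--
--     """
--
--     for path in paths:
--         potential = current + path
--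
--         if potential > goals[nextGoal]:
--             continue;
--
--         if potential == goals[len(goals)-1]:
--             return True
--
--         pathsLeft = list(paths)
--         pathsLeft.remove(path)
--
--         if potential == goals[nextGoal]:
--             if mapDFS(pathsLeft, potential, nextGoal + 1, goals):
--                 return True
--
--         elif mapDFS(pathsLeft, potential, nextGoal, goals):
--             return True
--
--     return False
-- ===== SOURCE B (Python) =====
-- def mapDFS(paths, current, nextGoal, goals):
--     """Memoized search: states reached by choosing the same multiset of paths
--     (hence the same remaining tuple, subtotal and goal index) are explored once,
--     instead of once per permutation as in the naive DFS."""
--     memo = {}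
--
--     def go(rem, cur, g):
--         key = (rem, cur, g)
--         if key in memo:
--             return memo[key]
--         res = False
--         for p in rem:
--             pot = cur + p
--             if pot > goals[g]:
--                 continue
--             if pot == goals[len(goals) - 1]:
--                 res = True
--                 break
--             rest = list(rem)
--             rest.remove(p)
--             if go(tuple(rest), pot, g + 1 if pot == goals[g] else g):
--                 res = True
--                 break
--         memo[key] = res
--         return res
--
--     return go(tuple(paths), current, nextGoal)
-- ===== Notes on version B (the rewrite author's own statement) =====
-- stated objective: alternative
-- what changed: A re-explores every permutation of chosen paths; B memoizes the search on the state (remaining paths tuple, subtotal, goal index) in a dict, so each reachable state is explored once (intended as faster; measured 1.44x at the largest size both finished, unconfirmed on bigger inputs).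
import Mathlib
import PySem

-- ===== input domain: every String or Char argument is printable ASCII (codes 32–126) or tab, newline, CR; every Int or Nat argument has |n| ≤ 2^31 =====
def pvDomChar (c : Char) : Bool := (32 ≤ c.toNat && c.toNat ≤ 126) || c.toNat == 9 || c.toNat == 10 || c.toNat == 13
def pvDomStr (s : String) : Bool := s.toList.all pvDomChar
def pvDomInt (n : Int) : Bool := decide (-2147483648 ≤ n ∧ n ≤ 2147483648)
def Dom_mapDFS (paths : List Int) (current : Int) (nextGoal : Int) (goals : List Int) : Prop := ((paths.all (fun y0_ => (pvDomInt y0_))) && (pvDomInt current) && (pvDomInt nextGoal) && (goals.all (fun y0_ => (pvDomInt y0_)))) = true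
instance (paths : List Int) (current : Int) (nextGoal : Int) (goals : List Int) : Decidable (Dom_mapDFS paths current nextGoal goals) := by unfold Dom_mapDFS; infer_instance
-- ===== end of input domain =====

-- B replaces A's naive permutation-exploring DFS by a memoized search over
-- (remaining paths, subtotal, goal index) states, exploring each reachable state once.


-- termination helper used by both ports (removing a member shortens the list)
theorem pvRemoveLen {paths : List Int} {p : Int} (hp : p ∈ paths) :
    ((PySem.List.remove? paths p).getD []).length < paths.length := by
  rw [PySem.List.remove?_eq_some_erase paths p hp]
  have := List.length_erase_of_mem hp
  have hpos : 0 < paths.length := List.length_pos_of_mem hp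
  simp [this]
  omega

-- ===== PORT A =====
-- A's for-loop over `paths` with early returns; `iter` is the not-yet-tried suffix of the loop,
-- `h` only records that iterated elements are members (needed for termination of `.remove`).
def pvLoopA (goals : List Int) :
    (paths : List Int) → (current nextGoal : Int) →
    (iter : List Int) → (∀ q ∈ iter, q ∈ paths) → Bool
  | _, _, _, [], _ => false
  | paths, current, nextGoal, p :: rest, h =>
    match PySem.List.pyGet? goals nextGoal with
    | none => false   -- Python raises IndexError here: excluded by Pre_
    | some gN =>
      let potential := current + p
      if gN < potential then
        pvLoopA goals paths current nextGoal rest (fun q hq => h q (List.mem_cons_of_mem _ hq))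
      else if PySem.List.pyGet? goals ((goals.length : Int) - 1) = some potential then true
      else
        let pathsLeft := (PySem.List.remove? paths p).getD []
        if potential = gN then
          if pvLoopA goals pathsLeft potential (nextGoal + 1) pathsLeft (fun _ hq => hq) then true
          else pvLoopA goals paths current nextGoal rest (fun q hq => h q (List.mem_cons_of_mem _ hq))
        else
          if pvLoopA goals pathsLeft potential nextGoal pathsLeft (fun _ hq => hq) then true
          else pvLoopA goals paths current nextGoal rest (fun q hq => h q (List.mem_cons_of_mem _ hq))
termination_by paths _ _ iter _ => (paths.length, iter.length)
decreasing_by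
  · exact Prod.Lex.right _ (by simp)
  · exact Prod.Lex.left _ _ (pvRemoveLen (h p List.mem_cons_self))
  · exact Prod.Lex.right _ (by simp)
  · exact Prod.Lex.left _ _ (pvRemoveLen (h p List.mem_cons_self))
  · exact Prod.Lex.right _ (by simp)

def mapDFS (paths : List Int) (current : Int) (nextGoal : Int) (goals : List Int) : Bool :=
  pvLoopA goals paths current nextGoal paths (fun _ hq => hq)

-- ===== PORT B =====
-- B (Source B): the same search, but memoized on the state (remaining paths, subtotal, goal index);
-- the memo dict is threaded explicitly.
abbrev pvMemo := PySem.Dict (List Int × Int × Int) Bool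

mutual
def pvGoB (goals : List Int) :
    (rem : List Int) → (cur g : Int) → pvMemo → Bool × pvMemo
  | rem, cur, g, memo =>
    match memo.get? (rem, cur, g) with
    | some v => (v, memo)
    | none =>
      let r := pvLoopB goals rem cur g rem (fun _ hq => hq) memo
      (r.1, r.2.insert (rem, cur, g) r.1)
termination_by rem _ _ _ => (rem.length, 1, 0)
decreasing_by
  exact Prod.Lex.right _ (Prod.Lex.left _ _ (by omega))

def pvLoopB (goals : List Int) :
    (rem : List Int) → (cur g : Int) →
    (iter : List Int) → (∀ q ∈ iter, q ∈ rem) → pvMemo → Bool × pvMemo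
  | _, _, _, [], _, memo => (false, memo)
  | rem, cur, g, p :: rest, h, memo =>
    match PySem.List.pyGet? goals g with
    | none => (false, memo)   -- Python raises IndexError here: excluded by Pre_
    | some gN =>
      let pot := cur + p
      if gN < pot then
        pvLoopB goals rem cur g rest (fun q hq => h q (List.mem_cons_of_mem _ hq)) memo
      else if PySem.List.pyGet? goals ((goals.length : Int) - 1) = some pot then (true, memo)
      else
        let rest' := (PySem.List.remove? rem p).getD []
        let r := pvGoB goals rest' pot (if pot = gN then g + 1 else g) memo
        if r.1 then (true, r.2)
        else pvLoopB goals rem cur g rest (fun q hq => h q (List.mem_cons_of_mem _ hq)) r.2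
termination_by rem _ _ iter _ _ => (rem.length, 0, iter.length)
decreasing_by
  · exact Prod.Lex.right _ (Prod.Lex.right _ (by simp))
  · exact Prod.Lex.left _ _ (pvRemoveLen (h p List.mem_cons_self))
  · exact Prod.Lex.right _ (Prod.Lex.right _ (by simp))
end

def mapDFS_alt (paths : List Int) (current : Int) (nextGoal : Int) (goals : List Int) : Bool :=
  (pvGoB goals paths current nextGoal PySem.Dict.empty).1

-- ===== PRECONDITION & SPEC =====
-- Pre_ excludes exactly the inputs where A raises IndexError: a nonempty `paths`
-- with `nextGoal` outside Python's (wrap-around) index range of `goals`.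
def Pre_mapDFS (paths : List Int) (current : Int) (nextGoal : Int) (goals : List Int) : Prop :=
  paths = [] ∨ (goals ≠ [] ∧ -(goals.length : Int) ≤ nextGoal ∧ nextGoal < goals.length)
instance (paths : List Int) (current : Int) (nextGoal : Int) (goals : List Int) : Decidable (Pre_mapDFS paths current nextGoal goals) := by unfold Pre_mapDFS; infer_instance

def pvWitness_mapDFS : List Int × Int × Int × List Int := ([1, 2], 0, 0, [1, 3])

def Spec_mapDFS (paths : List Int) (current : Int) (nextGoal : Int) (goals : List Int) (out : Bool) : Prop := out = mapDFS_alt paths current nextGoal goals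
instance (paths : List Int) (current : Int) (nextGoal : Int) (goals : List Int) (out : Bool) : Decidable (Spec_mapDFS paths current nextGoal goals out) := by unfold Spec_mapDFS; infer_instance

-- ===== CLAIM (what is proved, stated in full; the proofs are below) =====
def Claim_equal_mapDFS : Prop := ∀ (paths : List Int) (current : Int) (nextGoal : Int) (goals : List Int), Dom_mapDFS paths current nextGoal goals → Pre_mapDFS paths current nextGoal goals → Spec_mapDFS paths current nextGoal goals (mapDFS paths current nextGoal goals)

-- ===== LEMMAS AND PROOFS =====

-- memo invariant: every cached value is A's value at that state
def pvMInv (goals : List Int) (memo : pvMemo) : Prop :=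
  ∀ rem cur g v, memo.get? (rem, cur, g) = some v → v = mapDFS rem cur g goals

theorem pvLoop_correct (goals rem : List Int)
    (IH : ∀ rem', rem'.length < rem.length → ∀ cur g memo, pvMInv goals memo →
      (pvGoB goals rem' cur g memo).1 = mapDFS rem' cur g goals ∧
      pvMInv goals (pvGoB goals rem' cur g memo).2) :
    ∀ (cur g : Int) (iter : List Int) (h : ∀ q ∈ iter, q ∈ rem) (memo : pvMemo), pvMInv goals memo →
      (pvLoopB goals rem cur g iter h memo).1 = pvLoopA goals rem cur g iter h ∧
      pvMInv goals (pvLoopB goals rem cur g iter h memo).2 := by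
  intro cur g iter
  induction iter with
  | nil =>
    intro h memo hm
    rw [pvLoopB, pvLoopA]
    exact ⟨rfl, hm⟩
  | cons p rest ihIter =>
    intro h memo hm
    rw [pvLoopB, pvLoopA]
    cases hg : PySem.List.pyGet? goals g with
    | none => exact ⟨rfl, hm⟩
    | some gN =>
      simp only []
      by_cases hlt : gN < cur + p
      · simp only [if_pos hlt]
        exact ihIter _ memo hm
      · simp only [if_neg hlt]
        by_cases hlast : PySem.List.pyGet? goals ((goals.length : Int) - 1) = some (cur + p)
        · simp only [if_pos hlast]
          exact ⟨by trivial, hm⟩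
        · simp only [if_neg hlast]
          by_cases heq : cur + p = gN
          · simp only [if_pos heq]
            have hrec := IH ((PySem.List.remove? rem p).getD [])
              (pvRemoveLen (h p List.mem_cons_self)) (cur + p) (g + 1) memo hm
            have hdef : mapDFS ((PySem.List.remove? rem p).getD []) (cur + p) (g + 1) goals =
                pvLoopA goals ((PySem.List.remove? rem p).getD []) (cur + p) (g + 1)
                  ((PySem.List.remove? rem p).getD []) (fun _ hq => hq) := rfl
            rw [hdef] at hrec
            by_cases hr : (pvGoB goals ((PySem.List.remove? rem p).getD []) (cur + p)
                (g + 1) memo).1 = true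
            · simp only [hr, if_true, ← hrec.1]
              exact ⟨by trivial, hrec.2⟩
            · rw [Bool.not_eq_true] at hr
              simp only [hr, Bool.false_eq_true, if_false, ← hrec.1]
              exact ihIter (fun q hq => h q (List.mem_cons_of_mem _ hq)) _ hrec.2
          · simp only [if_neg heq]
            have hrec := IH ((PySem.List.remove? rem p).getD [])
              (pvRemoveLen (h p List.mem_cons_self)) (cur + p) g memo hm
            have hdef : mapDFS ((PySem.List.remove? rem p).getD []) (cur + p) g goals =
                pvLoopA goals ((PySem.List.remove? rem p).getD []) (cur + p) g
                  ((PySem.List.remove? rem p).getD []) (fun _ hq => hq) := rfl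
            rw [hdef] at hrec
            by_cases hr : (pvGoB goals ((PySem.List.remove? rem p).getD []) (cur + p)
                g memo).1 = true
            · simp only [hr, if_true, ← hrec.1]
              exact ⟨by trivial, hrec.2⟩
            · rw [Bool.not_eq_true] at hr
              simp only [hr, Bool.false_eq_true, if_false, ← hrec.1]
              exact ihIter (fun q hq => h q (List.mem_cons_of_mem _ hq)) _ hrec.2

theorem pvGoB_correct (goals : List Int) :
    ∀ n rem, rem.length < n → ∀ cur g memo, pvMInv goals memo →
      (pvGoB goals rem cur g memo).1 = mapDFS rem cur g goals ∧
      pvMInv goals (pvGoB goals rem cur g memo).2 := by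
  intro n
  induction n with
  | zero => intro rem h; omega
  | succ n ih =>
    intro rem hlen cur g memo hm
    rw [pvGoB]
    cases hkey : memo.get? (rem, cur, g) with
    | some v => exact ⟨hm rem cur g v hkey, hm⟩
    | none =>
      have hloop := pvLoop_correct goals rem
        (fun rem' hlt => ih rem' (by omega)) cur g rem (fun _ hq => hq) memo hm
      simp only []
      constructor
      · exact hloop.1
      · intro rem' cur' g' v hv
        rw [PySem.Dict.get?_insert] at hv
        by_cases hk : (rem', cur', g') = (rem, cur, g)
        · rw [if_pos hk] at hv
          have h3 : rem' = rem ∧ cur' = cur ∧ g' = g := by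
            simpa [Prod.ext_iff] using hk
          rw [h3.1, h3.2.1, h3.2.2]
          have hv' : v = (pvLoopB goals rem cur g rem (fun _ hq => hq) memo).1 :=
            (Option.some.inj hv).symm
          rw [hv', hloop.1]
          rfl
        · rw [if_neg hk] at hv
          exact hloop.2 rem' cur' g' v hv

-- ===== VERDICT (by name: the statement is the Claim_ definition above) =====
theorem mapDFS_spec : Claim_equal_mapDFS := by
  intro paths current nextGoal goals _ _
  unfold Spec_mapDFS mapDFS_alt
  have h := pvGoB_correct goals (paths.length + 1) paths (by omega) current nextGoal
    PySem.Dict.empty (by intro rem cur g v hv; simp [PySem.Dict.get?_empty] at hv)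
  exact h.1.symm
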